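-- pv_equiv track=rewrite | github.com/goodreasonai/abbey | backend/app/prompts/quiz_prompts.py | _existing_qs
-- ===== SOURCE A (Python) =====
-- def _existing_qs(prev_q_texts, trim=True):
--     res = ""
--     if prev_q_texts and len(prev_q_texts):
--         res += "\nIt is very important that you do not repeat questions. Instead, **make them as varied as possible.** The test already has some content; please AVOID repeating these existing questions and cover new ground if possible: "
--         for i, q in enumerate(prev_q_texts):
--             if i < 3 or not trim:
--                 res += f"\n{i+1}. {q}"
--             elif i == len(prev_q_texts) - 1:
--                 res += f"\n...\n{i+1}. {q}"
--     return res
-- ===== SOURCE B (Python) =====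
-- def _existing_qs(prev_q_texts, trim=True):
--     if not prev_q_texts:
--         return ""
--     header = "\nIt is very important that you do not repeat questions. Instead, **make them as varied as possible.** The test already has some content; please AVOID repeating these existing questions and cover new ground if possible: "
--     if trim and len(prev_q_texts) > 3:
--         body = "".join(f"\n{i+1}. {q}" for i, q in enumerate(prev_q_texts[:3]))
--         body += f"\n...\n{len(prev_q_texts)}. {prev_q_texts[-1]}"
--     else:
--         body = "".join(f"\n{i+1}. {q}" for i, q in enumerate(prev_q_texts))
--     return header + body
-- ===== Notes on version B (the rewrite author's own statement) =====
-- stated objective: simpler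
-- what changed: B replaces A's conditional loop over every element (with its per-iteration i<3 / last-index tests) by slice-based assembly: join the numbered first three entries from prev_q_texts[:3], then append the ellipsis line with prev_q_texts[-1] when trimming, never walking the skipped middle items.
import Mathlib
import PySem

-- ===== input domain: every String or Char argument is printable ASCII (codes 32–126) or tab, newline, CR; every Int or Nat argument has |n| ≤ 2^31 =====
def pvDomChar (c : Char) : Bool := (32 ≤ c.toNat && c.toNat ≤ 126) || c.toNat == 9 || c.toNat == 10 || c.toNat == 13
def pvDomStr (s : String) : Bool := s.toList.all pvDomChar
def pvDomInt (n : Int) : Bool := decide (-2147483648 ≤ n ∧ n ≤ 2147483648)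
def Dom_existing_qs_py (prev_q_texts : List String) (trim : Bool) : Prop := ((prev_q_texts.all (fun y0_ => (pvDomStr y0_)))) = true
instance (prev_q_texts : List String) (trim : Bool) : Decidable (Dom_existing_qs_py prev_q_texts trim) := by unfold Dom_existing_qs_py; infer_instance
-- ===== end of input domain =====

-- B builds the result from slices (first three entries, then the numbered last entry when
-- trimming) instead of A's conditional walk over every element; objective: simpler.

-- the shared prompt header literal
def pvHdr : String := "\nIt is very important that you do not repeat questions. Instead, **make them as varied as possible.** The test already has some content; please AVOID repeating these existing questions and cover new ground if possible: "

-- ===== PORT A =====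
-- loop body of A's 'for i, q in enumerate(prev_q_texts)'
def stepA (L : Int) (trim : Bool) (res : String) (iq : Int × String) : String :=
  if iq.1 < 3 ∨ trim = false then
    res ++ "\n" ++ PySem.Int.toStr (iq.1 + 1) ++ ". " ++ iq.2
  else if iq.1 = L - 1 then
    res ++ "\n...\n" ++ PySem.Int.toStr (iq.1 + 1) ++ ". " ++ iq.2
  else res

def existing_qs_py (prev_q_texts : List String) (trim : Bool) : String :=
  let res := ""
  if prev_q_texts ≠ [] then
    (PySem.List.enumerate prev_q_texts).foldl
      (stepA (prev_q_texts.length : Int) trim) (res ++ pvHdr)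
  else res

-- ===== PORT B =====
-- f"\n{i+1}. {q}"
def lineB (i : Int) (q : String) : String := "\n" ++ PySem.Int.toStr (i + 1) ++ ". " ++ q

def existing_qs_py_alt (prev_q_texts : List String) (trim : Bool) : String :=
  if prev_q_texts = [] then "" else
  let body :=
    if trim && decide ((3 : Int) < (prev_q_texts.length : Int)) then
      -- prev_q_texts[-1] via pyGetD: the list is nonempty on this branch, so the default is never used
      String.join ((PySem.List.enumerate (PySem.List.slice prev_q_texts none (some 3))).map
          (fun iq => lineB iq.1 iq.2))
        ++ "\n...\n" ++ PySem.Int.toStr (prev_q_texts.length : Int) ++ ". "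
        ++ PySem.List.pyGetD prev_q_texts (-1) ""
    else
      String.join ((PySem.List.enumerate prev_q_texts).map (fun iq => lineB iq.1 iq.2))
  pvHdr ++ body

-- ===== PRECONDITION & SPEC =====
def Spec_existing_qs_py (prev_q_texts : List String) (trim : Bool) (out : String) : Prop := out = existing_qs_py_alt prev_q_texts trim
instance (prev_q_texts : List String) (trim : Bool) (out : String) : Decidable (Spec_existing_qs_py prev_q_texts trim out) := by unfold Spec_existing_qs_py; infer_instance

-- ===== CLAIM (what is proved, stated in full; the proofs are below) =====
def Claim_equal_existing_qs_py : Prop := ∀ (prev_q_texts : List String) (trim : Bool), Dom_existing_qs_py prev_q_texts trim → Spec_existing_qs_py prev_q_texts trim (existing_qs_py prev_q_texts trim)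

-- ===== LEMMAS AND PROOFS =====

theorem join_cons (x : String) (l : List String) : String.join (x :: l) = x ++ String.join l := by
  have h : ∀ (l : List String) (a : String), l.foldl (· ++ ·) a = a ++ String.join l := by
    intro l
    induction l with
    | nil => intro a; exact String.append_empty.symm
    | cons y ys ih =>
      intro a
      rw [List.foldl_cons, ih]
      show a ++ y ++ String.join ys = a ++ String.join (y :: ys)
      have : String.join (y :: ys) = ys.foldl (· ++ ·) ("" ++ y) := rfl
      rw [this, ih, String.empty_append, String.append_assoc]
  show (x :: l).foldl (· ++ ·) "" = x ++ String.join l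
  rw [List.foldl_cons, h, String.empty_append]

-- when every index takes the first branch, A's loop appends lineB for each entry
theorem foldA_lines (L : Int) (trim : Bool) (ys : List String) :
    ∀ (s : Int) (acc : String),
      (∀ k : Nat, k < ys.length → (s + k < 3 ∨ trim = false)) →
      (PySem.List.enumerate ys s).foldl (stepA L trim) acc
        = acc ++ String.join ((PySem.List.enumerate ys s).map (fun iq => lineB iq.1 iq.2)) := by
  induction ys with
  | nil => intro s acc _; simp [PySem.List.enumerate_nil, String.join, String.append_empty]
  | cons y ys ih =>
    intro s acc h
    rw [PySem.List.enumerate_cons, List.foldl_cons, List.map_cons, join_cons]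
    have h0 : s < 3 ∨ trim = false := by
      have := h 0 (by simp); simpa using this
    have hstep : stepA L trim acc (s, y)
        = acc ++ ("\n" ++ PySem.Int.toStr (s + 1) ++ ". " ++ y) := by
      simp only [stepA]
      rw [if_pos h0]
      simp [String.append_assoc]
    rw [hstep, ih (s + 1) _ ?side]
    case side =>
      intro k hk
      rcases h (k + 1) (by simpa using Nat.succ_lt_succ hk) with hlt | hf
      · left; push_cast at hlt ⊢; omega
      · right; exact hf
    simp [lineB, String.append_assoc]

-- A's loop over the tail (all indices ≥ 3, trim = true): only the last entry, numbered L, survives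
theorem foldA_tail (L : Int) (ys : List String) :
    ∀ (s : Int) (acc : String), 3 ≤ s → s + ys.length = L → ys ≠ [] →
      (PySem.List.enumerate ys s).foldl (stepA L true) acc
        = acc ++ ("\n...\n" ++ PySem.Int.toStr L ++ ". " ++ (ys.getLast?).getD "") := by
  induction ys with
  | nil => intro s acc _ _ h; exact absurd rfl h
  | cons y ys ih =>
    intro s acc h3 hL _
    rw [PySem.List.enumerate_cons, List.foldl_cons]
    cases ys with
    | nil =>
      have hs : s = L - 1 := by simp at hL; omega
      have hstep : stepA L true acc (s, y)
          = acc ++ ("\n...\n" ++ PySem.Int.toStr (s + 1) ++ ". " ++ y) := by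
        simp only [stepA]
        rw [if_neg (by simp; omega), if_pos hs]
        simp [String.append_assoc]
      rw [hstep]
      have : s + 1 = L := by omega
      simp [PySem.List.enumerate_nil, this]
    | cons z zs =>
      have hlen : s + (zs.length : Int) + 2 = L := by
        simp only [List.length_cons] at hL; push_cast at hL ⊢; omega
      have hstep : stepA L true acc (s, y) = acc := by
        simp only [stepA]
        rw [if_neg (by simp; omega), if_neg (by omega)]
      rw [hstep, ih (s + 1) acc (by omega)
            (by simp only [List.length_cons] at hL ⊢; push_cast at hL ⊢; omega) (by simp)]
      simp

theorem getLast?_drop_getD (xs : List String) (h : 3 < xs.length) :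
    ((xs.drop 3).getLast?).getD "" = PySem.List.pyGetD xs (-1) "" := by
  have hne : xs ≠ [] := by intro hc; simp [hc] at h
  have hdne : xs.drop 3 ≠ [] := by
    intro hc
    have := List.drop_eq_nil_iff.mp hc
    omega
  have h1 : xs.getLast? = (xs.drop 3).getLast? := by
    conv_lhs => rw [← List.take_append_drop 3 xs]
    exact List.getLast?_append_of_ne_nil (l₁ := xs.take 3) hdne
  have h2 : PySem.List.pyGetD xs (-1) "" = xs.getLast hne := PySem.List.pyGetD_neg_one xs "" hne
  rw [← h1, List.getLast?_eq_some_getLast hne, Option.getD_some, h2]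

-- ===== VERDICT (by name: the statement is the Claim_ definition above) =====
theorem existing_qs_py_spec : Claim_equal_existing_qs_py := by
  intro xs trim _
  show existing_qs_py xs trim = existing_qs_py_alt xs trim
  by_cases hnil : xs = []
  · simp [existing_qs_py, existing_qs_py_alt, hnil]
  · simp only [existing_qs_py, existing_qs_py_alt, if_neg hnil, if_pos hnil]
    by_cases htrim : trim = true
    · subst htrim
      by_cases hlen : 3 < xs.length
      · -- trimmed branch
        have hsplit : xs = xs.take 3 ++ xs.drop 3 := (List.take_append_drop 3 xs).symm
        have hdne : xs.drop 3 ≠ [] := by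
          intro hc; have := List.drop_eq_nil_iff.mp hc; omega
        have htlen : (xs.take 3).length = 3 := by simp; omega
        conv_lhs => rw [hsplit]
        rw [PySem.List.enumerate_append, List.foldl_append]
        rw [foldA_lines _ _ _ 0 _ (by intro k hk; left; rw [htlen] at hk; omega)]
        rw [htlen]
        rw [foldA_tail _ _ _ _ (by norm_num)
              (by rw [← hsplit] at *; simp [List.length_drop]; omega) hdne]
        have hslice : PySem.List.slice xs none (some 3) = xs.take 3 := by
          have := PySem.List.slice_to_natCast xs 3; simpa using this
        rw [if_pos (by simp; omega), hslice, getLast?_drop_getD xs hlen]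
        have hcast : ((xs.take 3 ++ xs.drop 3).length : Int) = (xs.length : Int) := by
          rw [← hsplit]
        simp [String.append_assoc]
      · -- short list: everything printed
        rw [foldA_lines _ _ _ 0 _ (by intro k hk; left; omega)]
        rw [if_neg (by simp; omega)]
        simp
    · -- trim = False: everything printed
      have : trim = false := by simpa using htrim
      subst this
      rw [foldA_lines _ _ _ 0 _ (by intro k _; right; rfl)]
      rw [if_neg (by simp)]
      simp
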